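-- pv_equiv track=rewrite | github.com/ritz-lang/rz | projects/larb/tools/migrate_cstr.py | get_function_context
-- ===== SOURCE A (Python) =====
-- def get_function_context(content: str, pos: int) -> str:
--     """Get the function name that this literal is being passed to."""
--     # Look backwards for function call pattern: name(
--     before = content[:pos]
--     # Find the most recent '(' before our position
--     paren_pos = before.rfind('(')
--     if paren_pos == -1:
--         return None
--
--     # Extract potential function name (alphanumeric before the paren)
--     name_end = paren_pos
--     name_start = name_end - 1
--     while name_start >= 0 and (before[name_start].isalnum() or before[name_start] == '_'):
--         name_start -= 1
--     name_start += 1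
--
--     if name_start < name_end:
--         return before[name_start:name_end]
--     return None
-- ===== SOURCE B (Python) =====
-- def get_function_context(content: str, pos: int) -> str:
--     """Single forward scan over content[:pos]: maintain the current identifier
--     token; at each '(' record it (or None if empty) as the candidate."""
--     cand = None
--     token = ''
--     for c in content[:pos]:
--         if c == '(':
--             cand = token or None
--             token = ''
--         elif c.isalnum() or c == '_':
--             token += c
--         else:
--             token = ''
--     return cand
-- ===== Notes on version B (the rewrite author's own statement) =====
-- stated objective: alternative
-- what changed: Replaces rfind-then-backward-walk with a single forward state-machine scan that maintains the current identifier token and records it at every '(' , returning the last recorded candidate.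
import Mathlib
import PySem

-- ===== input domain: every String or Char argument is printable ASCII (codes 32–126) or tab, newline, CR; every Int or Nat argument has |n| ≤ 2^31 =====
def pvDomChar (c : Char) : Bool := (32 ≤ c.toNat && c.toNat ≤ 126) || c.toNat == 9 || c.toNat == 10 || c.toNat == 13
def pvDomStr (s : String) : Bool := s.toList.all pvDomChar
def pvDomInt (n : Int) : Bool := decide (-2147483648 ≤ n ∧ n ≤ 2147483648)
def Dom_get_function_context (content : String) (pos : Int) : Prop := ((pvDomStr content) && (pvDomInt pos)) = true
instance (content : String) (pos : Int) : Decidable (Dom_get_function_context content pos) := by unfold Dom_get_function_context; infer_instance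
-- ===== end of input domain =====

-- B replaces A's rfind-then-backward-walk by a single forward state-machine scan (alternative decomposition, same cost).

-- ===== PORT A =====
-- A's backward while loop: pvWalkA before n = final name_start when the loop is entered with name_end = n.
-- (before.getD n ' ' reads before[name_start]; the loop only reads in-range indices, so getD's default is never used.)
def pvWalkA (before : List Char) : Nat → Nat
  | 0 => 0
  | n+1 =>
    if PySem.Chars.isalnum (before.getD n ' ') || (before.getD n ' ' == '_') then pvWalkA before n
    else n+1

def get_function_context (content : String) (pos : Int) : Option String :=
  let before := PySem.List.slice content.toList none (some pos)
  let parenPos := PySem.Chars.rfind before ['(']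
  if parenPos = -1 then none
  else
    let nameEnd := parenPos.toNat
    let nameStart := pvWalkA before nameEnd
    if nameStart < nameEnd then
      some (String.ofList (PySem.List.slice before (some (nameStart : Int)) (some (nameEnd : Int))))
    else none

-- ===== PORT B =====
-- B's loop body: state = (candidate so far, current identifier token).
def pvStepB (st : Option String × List Char) (c : Char) : Option String × List Char :=
  if c == '(' then
    (if st.2.isEmpty then none else some (String.ofList st.2), [])
  else if PySem.Chars.isalnum c || c == '_' then (st.1, st.2 ++ [c])
  else (st.1, [])

def get_function_context_alt (content : String) (pos : Int) : Option String :=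
  let before := PySem.List.slice content.toList none (some pos)
  (before.foldl pvStepB (none, [])).1

-- ===== PRECONDITION & SPEC =====
def Spec_get_function_context (content : String) (pos : Int) (out : Option String) : Prop := out = get_function_context_alt content pos
instance (content : String) (pos : Int) (out : Option String) : Decidable (Spec_get_function_context content pos out) := by unfold Spec_get_function_context; infer_instance

-- ===== CLAIM (what is proved, stated in full; the proofs are below) =====
def Claim_equal_get_function_context : Prop := ∀ (content : String) (pos : Int), Dom_get_function_context content pos → Spec_get_function_context content pos (get_function_context content pos)

-- ===== LEMMAS AND PROOFS =====

-- identifier test shared by both programs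
def pvIdent (c : Char) : Bool := PySem.Chars.isalnum c || c == '_'

-- maximal identifier suffix of a list
def pvIdSuffix (l : List Char) : List Char := (l.reverse.takeWhile pvIdent).reverse

lemma pvIdent_paren : pvIdent '(' = false := by decide

lemma pvIdSuffix_append_ident (m : List Char) (c : Char) (h : pvIdent c = true) :
    pvIdSuffix (m ++ [c]) = pvIdSuffix m ++ [c] := by
  simp [pvIdSuffix, h]

lemma pvIdSuffix_append_not (m : List Char) (c : Char) (h : pvIdent c = false) :
    pvIdSuffix (m ++ [c]) = [] := by
  simp [pvIdSuffix, h]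

lemma pvIdSuffix_length_le (l : List Char) : (pvIdSuffix l).length ≤ l.length := by
  simpa [pvIdSuffix] using (List.takeWhile_sublist (l := l.reverse) pvIdent).length_le

lemma pvIdSuffix_of_all (l : List Char) (h : l.all pvIdent) : pvIdSuffix l = l := by
  unfold pvIdSuffix
  rw [List.takeWhile_eq_self_iff.mpr, List.reverse_reverse]
  intro a ha
  exact List.all_eq_true.mp h a (List.mem_reverse.mp ha)

lemma pvIdSuffix_suffix (l : List Char) :
    l.drop (l.length - (pvIdSuffix l).length) = pvIdSuffix l := by
  obtain ⟨t, ht⟩ : pvIdSuffix l <:+ l := by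
    simpa [pvIdSuffix] using (List.takeWhile_prefix (l := l.reverse) pvIdent).reverse
  have hlen := congrArg List.length ht
  simp only [List.length_append] at hlen
  rw [show l.length - (pvIdSuffix l).length = t.length from by omega]
  conv_lhs => rw [← ht]
  exact List.drop_left

-- walk-back loop computes length - |identifier suffix|
lemma pvWalkA_spec (l₁ rest : List Char) :
    pvWalkA (l₁ ++ rest) l₁.length = l₁.length - (pvIdSuffix l₁).length := by
  induction l₁ using List.reverseRecOn generalizing rest with
  | nil => simp [pvWalkA, pvIdSuffix]
  | append_singleton m c ih =>
    have hget : (m ++ [c] ++ rest).getD m.length ' ' = c := by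
      simp [List.getD]
    simp only [List.length_append, List.length_singleton, pvWalkA, hget]
    cases hc : pvIdent c with
    | true =>
      have hid : (PySem.Chars.isalnum c || c == '_') = true := hc
      rw [if_pos hid, pvIdSuffix_append_ident m c hc]
      have h1 := ih ([c] ++ rest)
      simp only [List.append_assoc] at h1 ⊢
      rw [h1]
      have := pvIdSuffix_length_le m
      simp only [List.length_append, List.length_singleton]
      omega
    | false =>
      have hid : (PySem.Chars.isalnum c || c == '_') = false := hc
      rw [if_neg (by simp [hid]), pvIdSuffix_append_not m c hc]
      simp

-- rfind characterization for a single character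
lemma rfind_go_succ (s sub : List Char) (j : Nat) :
    PySem.Chars.rfind.go s sub (j+1) =
      if sub.isPrefixOf (s.drop (j+1)) then ((j+1 : Nat) : Int) else PySem.Chars.rfind.go s sub j := by
  rfl

lemma rfind_go_zero (s sub : List Char) :
    PySem.Chars.rfind.go s sub 0 = if sub.isPrefixOf s then 0 else -1 := by rfl

lemma paren_prefix_iff (s : List Char) (i : Nat) :
    (['('].isPrefixOf (s.drop i)) = true ↔ s[i]? = some '(' := by
  rw [List.isPrefixOf_iff_prefix, ← List.head?_drop]
  cases hd : s.drop i with
  | nil => simp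
  | cons a t =>
    rw [List.cons_prefix_cons]
    simp [eq_comm]

lemma rfind_go_none (s : List Char) (j : Nat) (h : ∀ i, i ≤ j → s[i]? ≠ some '(') :
    PySem.Chars.rfind.go s ['('] j = -1 := by
  induction j with
  | zero =>
    rw [rfind_go_zero, if_neg]
    intro hp
    exact h 0 (Nat.le_refl 0) ((paren_prefix_iff s 0).mp (by simpa using hp))
  | succ j ih =>
    rw [rfind_go_succ, if_neg]
    · exact ih (fun i hi => h i (Nat.le_succ_of_le hi))
    · intro hp
      exact h (j+1) (Nat.le_refl _) ((paren_prefix_iff s (j+1)).mp hp)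

lemma rfind_go_last (s : List Char) (k j : Nat) (hk : s[k]? = some '(') (hkj : k ≤ j)
    (h : ∀ i, k < i → i ≤ j → s[i]? ≠ some '(') :
    PySem.Chars.rfind.go s ['('] j = (k : Int) := by
  induction j with
  | zero =>
    have hk0 : k = 0 := Nat.le_zero.mp hkj
    subst hk0
    have hpre := (paren_prefix_iff s 0).mpr hk
    rw [List.drop_zero] at hpre
    rw [rfind_go_zero, if_pos hpre]
    simp
  | succ j ih =>
    rw [rfind_go_succ]
    by_cases hkj' : k = j + 1
    · subst hkj'
      rw [if_pos ((paren_prefix_iff s (j+1)).mpr hk)]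
    · have hkle : k ≤ j := by omega
      rw [if_neg]
      · exact ih hkle (fun i hi hij => h i hi (Nat.le_succ_of_le hij))
      · intro hp
        exact h (j+1) (by omega) (Nat.le_refl _) ((paren_prefix_iff s (j+1)).mp hp)

lemma rfind_no_paren (s : List Char) (h : '(' ∉ s) : PySem.Chars.rfind s ['('] = -1 := by
  unfold PySem.Chars.rfind
  exact rfind_go_none s s.length (fun i _ hi => h (List.mem_of_getElem? hi))

lemma rfind_split (l₁ l₂ : List Char) (h : '(' ∉ l₂) :
    PySem.Chars.rfind (l₁ ++ '(' :: l₂) ['('] = (l₁.length : Int) := by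
  unfold PySem.Chars.rfind
  apply rfind_go_last
  · simp
  · simp
  · intro i hi _ hc
    have : ('(' :: l₂)[i - l₁.length]? = some '(' := by
      rw [← List.getElem?_append_right (by omega : l₁.length ≤ i)]
      exact hc
    rcases hj : i - l₁.length with _ | j
    · omega
    · rw [hj] at this
      simp only [List.getElem?_cons_succ] at this
      exact h (List.mem_of_getElem? this)

-- B's fold: the candidate is untouched over a paren-free tail
lemma foldB_no_paren (l : List Char) (cand : Option String) (tok : List Char) (h : '(' ∉ l) :
    (l.foldl pvStepB (cand, tok)).1 = cand := by
  induction l generalizing tok with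
  | nil => rfl
  | cons c t ih =>
    have hc : ¬ c = '(' := fun hc => h (hc ▸ List.mem_cons_self)
    have ht : '(' ∉ t := fun hm => h (List.mem_cons_of_mem _ hm)
    simp only [List.foldl_cons, pvStepB, beq_iff_eq, if_neg hc]
    by_cases hid : (PySem.Chars.isalnum c || c == '_') = true
    · rw [if_pos hid]; exact ih _ ht
    · rw [if_neg hid]; exact ih _ ht

-- the token component after any list: identifier suffix (or tok ++ l when l is all-identifier)
lemma foldB_token (l : List Char) (cand : Option String) (tok : List Char) :
    (l.foldl pvStepB (cand, tok)).2 =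
      if l.all pvIdent then tok ++ l else pvIdSuffix l := by
  induction l using List.reverseRecOn generalizing cand tok with
  | nil => simp
  | append_singleton m c ih =>
    rw [List.foldl_append]
    rcases hst : m.foldl pvStepB (cand, tok) with ⟨cand', tok'⟩
    have htok' : tok' = if m.all pvIdent then tok ++ m else pvIdSuffix m := by
      have h1 := ih cand tok
      rw [hst] at h1
      exact h1
    simp only [List.foldl_cons, List.foldl_nil]
    by_cases hc : c = '('
    · subst hc
      simp [pvStepB, pvIdSuffix_append_not m '(' pvIdent_paren, List.all_append, pvIdent_paren]
    · cases hid : pvIdent c with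
      | true =>
        have hid' : (PySem.Chars.isalnum c || c == '_') = true := hid
        simp only [pvStepB, beq_iff_eq, if_neg hc, if_pos hid']
        by_cases hall : m.all pvIdent = true
        · rw [if_pos (by simp [hall, hid]), htok', if_pos hall]
          simp
        · rw [if_neg (by simp [hid]; simpa using hall), htok', if_neg hall,
            pvIdSuffix_append_ident m c hid]
      | false =>
        have hid' : (PySem.Chars.isalnum c || c == '_') = false := hid
        simp only [pvStepB, beq_iff_eq, if_neg hc, if_neg (by simp [hid'] :
          ¬ (PySem.Chars.isalnum c || c == '_') = true)]
        rw [if_neg (by simp [hid]), pvIdSuffix_append_not m c hid]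

-- existence of a decomposition at the last '('
lemma exists_last_paren (l : List Char) (h : '(' ∈ l) :
    ∃ l₁ l₂, l = l₁ ++ '(' :: l₂ ∧ '(' ∉ l₂ := by
  induction l using List.reverseRecOn with
  | nil => simp at h
  | append_singleton m c ih =>
    by_cases hc : c = '('
    · exact ⟨m, [], by simp [hc], by simp⟩
    · have hm : '(' ∈ m := by
        rcases List.mem_append.mp h with h1 | h1
        · exact h1
        · simp at h1
          exact absurd h1.symm hc
      obtain ⟨l₁, l₂, heq, hn⟩ := ih hm
      exact ⟨l₁, l₂ ++ [c], by simp [heq], by simp [hn, Ne.symm hc]⟩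

-- core equality on an arbitrary character list
lemma core_eq (before : List Char) :
    (if PySem.Chars.rfind before ['('] = -1 then none
     else
       let nameEnd := (PySem.Chars.rfind before ['(']).toNat
       let nameStart := pvWalkA before nameEnd
       if nameStart < nameEnd then
         some (String.ofList (PySem.List.slice before (some (nameStart : Int)) (some (nameEnd : Int))))
       else none) = (before.foldl pvStepB (none, [])).1 := by
  by_cases h : '(' ∈ before
  · obtain ⟨l₁, l₂, heq, hn⟩ := exists_last_paren before h
    subst heq
    rw [rfind_split l₁ l₂ hn]
    rw [if_neg (by omega : ¬ ((l₁.length : Int) = -1))]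
    simp only [Int.toNat_natCast]
    rw [pvWalkA_spec l₁ ('(' :: l₂)]
    -- B side: split the fold at the last '('
    rw [show l₁ ++ '(' :: l₂ = (l₁ ++ ['(']) ++ l₂ by simp, List.foldl_append, List.foldl_append]
    rcases hst : l₁.foldl pvStepB (none, []) with ⟨cand', tok'⟩
    have htok' : tok' = pvIdSuffix l₁ := by
      have h1 := foldB_token l₁ none []
      rw [hst] at h1
      dsimp only at h1
      by_cases hall : l₁.all pvIdent = true
      · rw [h1, if_pos hall, List.nil_append, pvIdSuffix_of_all l₁ hall]
      · rw [h1, if_neg hall]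
    have hstep : pvStepB (cand', tok') '(' =
        (if tok'.isEmpty then none else some (String.ofList tok'), []) := by
      simp [pvStepB]
    simp only [List.foldl_cons, List.foldl_nil]
    rw [hstep, foldB_no_paren l₂ _ [] hn]
    have hle := pvIdSuffix_length_le l₁
    by_cases hemp : (pvIdSuffix l₁).length = 0
    · rw [if_neg (by omega)]
      have hnil : pvIdSuffix l₁ = [] := List.length_eq_zero_iff.mp hemp
      have : tok'.isEmpty = true := by simp [htok', hnil]
      simp [this]
    · rw [if_pos (by omega)]
      have hne : tok'.isEmpty = false := by
        cases hpv : pvIdSuffix l₁ with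
        | nil => exact absurd (by simp [hpv]) hemp
        | cons a t => simp [htok', hpv]
      simp only [hne, Bool.false_eq_true, if_false]
      congr 1
      rw [PySem.List.slice_natCast]
      simp only [List.append_assoc, List.singleton_append]
      have hdrop : (l₁ ++ '(' :: l₂).drop (l₁.length - (pvIdSuffix l₁).length) =
          pvIdSuffix l₁ ++ '(' :: l₂ := by
        rw [List.drop_append_of_le_length (by omega), pvIdSuffix_suffix]
      rw [hdrop, show l₁.length - (l₁.length - (pvIdSuffix l₁).length) = (pvIdSuffix l₁).length
        from by omega]
      rw [List.take_append_of_le_length (Nat.le_refl _), List.take_length, htok']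
  · rw [rfind_no_paren before h, if_pos rfl, foldB_no_paren before none [] h]

-- ===== VERDICT (by name: the statement is the Claim_ definition above) =====
theorem get_function_context_spec : Claim_equal_get_function_context := by
  intro content pos _
  unfold Spec_get_function_context get_function_context get_function_context_alt
  exact core_eq (PySem.List.slice content.toList none (some pos))
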